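-- pv_equiv track=rewrite | github.com/pannonia-dao/eu-ai-act-risk-classifier | app.py | risk_score
-- ===== SOURCE A (Python) =====
-- PROHIBITED_PRACTICES = {
--     "social_scoring":           ("Social scoring by public authorities",                        "Art. 5(1)(c)"),
--     "realtime_biometric":       ("Real-time remote biometric ID in publicly accessible spaces", "Art. 5(1)(d)"),
--     "subliminal_manipulation":  ("Subliminal techniques bypassing conscious awareness",         "Art. 5(1)(a)"),
--     "exploit_vulnerability":    ("Exploitation of vulnerability of specific groups",            "Art. 5(1)(b)"),
--     "emotion_recognition_work": ("Emotion recognition in workplace or educational institutions","Art. 5(1)(f)"),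
--     "biometric_categorization": ("Biometric categorisation inferring sensitive attributes",     "Art. 5(1)(e)"),
--     "predictive_policing":      ("Individual criminal risk profiling without objective facts",  "Art. 5(1)(g)"),
--     "facial_scraping":          ("Untargeted scraping of facial images from internet/CCTV",     "Art. 5(1)(h)"),
-- }
--
-- ANNEX_III = {
--     "medical_devices":         ("Medical devices & healthcare",                         "Annex III §1"),
--     "critical_infrastructure": ("Critical infrastructure management",                   "Annex III §2"),
--     "education_vocational":    ("Education & vocational training",                      "Annex III §3"),
--     "employment_hr":           ("Employment, HR & workforce management",                "Annex III §4"),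
--     "essential_services":      ("Access to essential services (credit, insurance)",     "Annex III §5"),
--     "law_enforcement":         ("Law enforcement",                                      "Annex III §6"),
--     "migration_asylum":        ("Migration, asylum & border control",                   "Annex III §7"),
--     "justice_democracy":       ("Administration of justice & democratic processes",     "Annex III §8"),
--     "safety_components":       ("Safety components of regulated products",              "Annex III §1"),
-- }
--
-- def risk_score(a: dict) -> int:
--     if any(a.get(k) for k in PROHIBITED_PRACTICES): return 100
--     s = 0
--     if a.get("sector") in ANNEX_III:        s += 60
--     if a.get("safety_critical"):             s += 20
--     if a.get("affects_rights"):              s += 15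
--     if a.get("autonomous"):                  s += 10
--     if a.get("large_scale"):                 s += 8
--     if a.get("gpai_model"):                  s = max(s, 35)
--     if a.get("interacts_humans"):            s = max(s, 30)
--     if a.get("generates_content"):           s = max(s, 25)
--     return min(s, 99)
-- ===== SOURCE B (Python) =====
-- PROHIBITED_PRACTICES = {
--     "social_scoring":           ("Social scoring by public authorities",                        "Art. 5(1)(c)"),
--     "realtime_biometric":       ("Real-time remote biometric ID in publicly accessible spaces", "Art. 5(1)(d)"),
--     "subliminal_manipulation":  ("Subliminal techniques bypassing conscious awareness",         "Art. 5(1)(a)"),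
--     "exploit_vulnerability":    ("Exploitation of vulnerability of specific groups",            "Art. 5(1)(b)"),
--     "emotion_recognition_work": ("Emotion recognition in workplace or educational institutions","Art. 5(1)(f)"),
--     "biometric_categorization": ("Biometric categorisation inferring sensitive attributes",     "Art. 5(1)(e)"),
--     "predictive_policing":      ("Individual criminal risk profiling without objective facts",  "Art. 5(1)(g)"),
--     "facial_scraping":          ("Untargeted scraping of facial images from internet/CCTV",     "Art. 5(1)(h)"),
-- }
--
-- ANNEX_III = {
--     "medical_devices":         ("Medical devices & healthcare",                         "Annex III §1"),
--     "critical_infrastructure": ("Critical infrastructure management",                   "Annex III §2"),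
--     "education_vocational":    ("Education & vocational training",                      "Annex III §3"),
--     "employment_hr":           ("Employment, HR & workforce management",                "Annex III §4"),
--     "essential_services":      ("Access to essential services (credit, insurance)",     "Annex III §5"),
--     "law_enforcement":         ("Law enforcement",                                      "Annex III §6"),
--     "migration_asylum":        ("Migration, asylum & border control",                   "Annex III §7"),
--     "justice_democracy":       ("Administration of justice & democratic processes",     "Annex III §8"),
--     "safety_components":       ("Safety components of regulated products",              "Annex III §1"),
-- }
--
-- # Bit order: bit 0 = sector in ANNEX_III, then the seven boolean flags below.
-- FLAGS = ["safety_critical", "affects_rights", "autonomous", "large_scale",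
--          "gpai_model", "interacts_humans", "generates_content"]
--
-- def _score_of_mask(m: int) -> int:
--     b = [(m >> i) & 1 for i in range(8)]
--     base = 60 * b[0] + 20 * b[1] + 15 * b[2] + 10 * b[3] + 8 * b[4]
--     return min(max(base, 35 * b[5], 30 * b[6], 25 * b[7]), 99)
--
-- _TABLE = [_score_of_mask(m) for m in range(256)]
--
-- def risk_score(a: dict) -> int:
--     if any(a.get(k) for k in PROHIBITED_PRACTICES):
--         return 100
--     m = int(a.get("sector") in ANNEX_III)
--     for i, k in enumerate(FLAGS):
--         m |= bool(a.get(k)) << (i + 1)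
--     return _TABLE[m]
-- ===== Notes on version B (the rewrite author's own statement) =====
-- stated objective: alternative
-- what changed: Replaces A's sequential accumulator of interleaved additions and max-updates with a precomputed 256-entry score table built once at module load; risk_score then just packs the eight features into a bitmask and does a single table lookup.
import Mathlib
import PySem

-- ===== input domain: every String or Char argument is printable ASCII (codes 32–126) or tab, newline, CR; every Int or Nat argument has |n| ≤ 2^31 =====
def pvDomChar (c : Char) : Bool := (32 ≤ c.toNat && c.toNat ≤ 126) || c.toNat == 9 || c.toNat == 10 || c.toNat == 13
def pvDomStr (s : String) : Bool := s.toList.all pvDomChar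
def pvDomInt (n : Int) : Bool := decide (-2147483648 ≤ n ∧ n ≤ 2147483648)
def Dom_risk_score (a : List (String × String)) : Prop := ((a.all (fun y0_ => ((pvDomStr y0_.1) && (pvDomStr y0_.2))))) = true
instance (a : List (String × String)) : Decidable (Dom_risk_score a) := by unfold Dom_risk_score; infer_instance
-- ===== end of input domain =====

-- B replaces A's sequential add/max accumulator by a precomputed 256-entry lookup table
-- indexed by an 8-bit feature mask: a different data structure (alternative decomposition).

-- shared module constants (key sets of the two module-level dicts) and Python truthiness for str values
def pvProhibitedKeys : List String :=
  ["social_scoring", "realtime_biometric", "subliminal_manipulation", "exploit_vulnerability",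
   "emotion_recognition_work", "biometric_categorization", "predictive_policing", "facial_scraping"]
def pvAnnexKeys : List String :=
  ["medical_devices", "critical_infrastructure", "education_vocational", "employment_hr",
   "essential_services", "law_enforcement", "migration_asylum", "justice_democracy", "safety_components"]
def pvTruthy (o : Option String) : Bool := match o with
  | none => false
  | some s => s != ""

-- ===== PORT A =====
def risk_score (a : List (String × String)) : Int :=
  let d := PySem.Dict.mk a
  if pvProhibitedKeys.any (fun k => pvTruthy (d.get? k)) then 100
  else
    let s : Int := 0
    let s := if (d.get? "sector").elim false (fun v => pvAnnexKeys.contains v) then s + 60 else s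
    let s := if pvTruthy (d.get? "safety_critical") then s + 20 else s
    let s := if pvTruthy (d.get? "affects_rights") then s + 15 else s
    let s := if pvTruthy (d.get? "autonomous") then s + 10 else s
    let s := if pvTruthy (d.get? "large_scale") then s + 8 else s
    let s := if pvTruthy (d.get? "gpai_model") then max s 35 else s
    let s := if pvTruthy (d.get? "interacts_humans") then max s 30 else s
    let s := if pvTruthy (d.get? "generates_content") then max s 25 else s
    min s 99

-- ===== PORT B =====
-- bit order: bit 0 = sector in ANNEX_III, then the seven flags below
def pvFlags : List String :=
  ["safety_critical", "affects_rights", "autonomous", "large_scale",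
   "gpai_model", "interacts_humans", "generates_content"]

def pvScoreOfMask (m : Nat) : Int :=
  let b : List Int := (List.range 8).map (fun i => ((m >>> i) % 2 : Nat))
  let base : Int := 60 * b.getD 0 0 + 20 * b.getD 1 0 + 15 * b.getD 2 0
                    + 10 * b.getD 3 0 + 8 * b.getD 4 0
  min (max (max (max base (35 * b.getD 5 0)) (30 * b.getD 6 0)) (25 * b.getD 7 0)) 99

def pvTable : List Int := (List.range 256).map pvScoreOfMask

def risk_score_alt (a : List (String × String)) : Int :=
  let d := PySem.Dict.mk a
  if pvProhibitedKeys.any (fun k => pvTruthy (d.get? k)) then 100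
  else
    let m0 : Nat := if (d.get? "sector").elim false (fun v => pvAnnexKeys.contains v) then 1 else 0
    let m : Nat := (PySem.List.enumerate pvFlags).foldl
      (fun m ik => m ||| ((if pvTruthy (d.get? ik.2) then 1 else 0) <<< (ik.1.toNat + 1))) m0
    -- m < 256 always, so Python's _TABLE[m] never raises; getD 0 only totalizes the lookup
    (PySem.List.pyGet? pvTable (m : Int)).getD 0

-- ===== PRECONDITION & SPEC =====
def Spec_risk_score (a : List (String × String)) (out : Int) : Prop := out = risk_score_alt a
instance (a : List (String × String)) (out : Int) : Decidable (Spec_risk_score a out) := by unfold Spec_risk_score; infer_instance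

-- ===== CLAIM (what is proved, stated in full; the proofs are below) =====
def Claim_equal_risk_score : Prop := ∀ (a : List (String × String)), Dom_risk_score a → Spec_risk_score a (risk_score a)

-- ===== LEMMAS AND PROOFS =====

-- ===== VERDICT (by name: the statement is the Claim_ definition above) =====
set_option maxRecDepth 4000 in
theorem risk_score_spec : Claim_equal_risk_score := by
  intro a _
  unfold Spec_risk_score risk_score risk_score_alt
  dsimp only
  simp only [pvFlags, PySem.List.enumerate_cons, PySem.List.enumerate_nil,
    List.foldl_cons, List.foldl_nil]
  generalize (PySem.Dict.mk a) = d
  generalize pvProhibitedKeys.any (fun k => pvTruthy (d.get? k)) = bp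
  generalize (d.get? "sector").elim false (fun v => pvAnnexKeys.contains v) = bsec
  generalize pvTruthy (d.get? "safety_critical") = b1
  generalize pvTruthy (d.get? "affects_rights") = b2
  generalize pvTruthy (d.get? "autonomous") = b3
  generalize pvTruthy (d.get? "large_scale") = b4
  generalize pvTruthy (d.get? "gpai_model") = b5
  generalize pvTruthy (d.get? "interacts_humans") = b6
  generalize pvTruthy (d.get? "generates_content") = b7
  revert bp bsec b1 b2 b3 b4 b5 b6 b7
  decide
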